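-- pv_equiv track=rewrite | github.com/tituszban/advent_of_code_2021 | 15_2/main.py | generate_full_grid
-- ===== SOURCE A (Python) =====
-- def generate_full_grid(grid):
--     def increment_grid(_grid, v=1):
--         return [[(i - 1 + v) % 9 + 1 for i in row] for row in grid]
--
--     def combine_horizontal(_g1, _g2):
--         return [row1 + row2 for row1, row2 in zip(_g1, _g2)]
--
--     def combine_vertical(_g1, _g2):
--         return _g1 + _g2
--
--     left_col = [(increment_grid(grid, i), i) for i in range(5)]
--
--     comb = None
--
--     for left, base in left_col:
--         row = left
--         for i in range(1, 5):
--             row = combine_horizontal(row, increment_grid(left, i + base))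
--         if comb is None:
--             comb = row
--         else:
--             comb = combine_vertical(comb, row)
--
--     return comb
-- ===== SOURCE B (Python) =====
-- def generate_full_grid(grid):
--     # Direct per-cell formula: output row = (tile row tr, source row src),
--     # cell c comes from src[c % C] shifted by tr + c // C, wrapped 1..9.
--     return [
--         [(src[c % len(src)] - 1 + tr + c // len(src)) % 9 + 1
--          for c in range(5 * len(src))]
--         for tr in range(5)
--         for src in grid
--     ]
-- ===== Notes on version B (the rewrite author's own statement) =====
-- stated objective: simpler
-- what changed: Replaced A's tile-building pipeline (five incremented copies, zip-based horizontal combine in a fold, vertical concatenation with a None accumulator) by one flat comprehension that computes every output cell directly from its coordinates as (src[c%C] - 1 + tr + c//C) % 9 + 1.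
import Mathlib
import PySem

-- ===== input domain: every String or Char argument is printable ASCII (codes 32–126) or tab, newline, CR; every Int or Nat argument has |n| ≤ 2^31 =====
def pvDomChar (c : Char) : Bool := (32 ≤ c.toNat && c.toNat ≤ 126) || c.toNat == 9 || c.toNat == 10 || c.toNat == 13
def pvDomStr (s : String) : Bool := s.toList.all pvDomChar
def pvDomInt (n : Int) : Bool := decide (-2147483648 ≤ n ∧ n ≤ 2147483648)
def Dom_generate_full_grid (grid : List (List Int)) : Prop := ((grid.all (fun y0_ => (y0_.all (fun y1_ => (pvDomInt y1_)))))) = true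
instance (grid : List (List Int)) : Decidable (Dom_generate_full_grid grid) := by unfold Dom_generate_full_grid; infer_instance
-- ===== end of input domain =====

-- B replaces A's tile-then-concatenate construction (zip + list-add combine helpers)
-- by a single flat comprehension with a per-cell coordinate formula; objective: simpler.


-- ===== PORT A =====
-- Note: Python's increment_grid ignores its _grid argument and reads the captured
-- outer `grid`; the port reproduces that faithfully.
def generate_full_grid (grid : List (List Int)) : List (List Int) :=
  let increment_grid : List (List Int) → Int → List (List Int) := fun _g v =>
    grid.map (fun row => row.map (fun i => PySem.Int.mod (i - 1 + v) 9 + 1))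
  let combine_horizontal : List (List Int) → List (List Int) → List (List Int) := fun g1 g2 =>
    (g1.zip g2).map (fun p => p.1 ++ p.2)
  let combine_vertical : List (List Int) → List (List Int) → List (List Int) := fun g1 g2 =>
    g1 ++ g2
  let left_col := (PySem.List.pyRange 0 5 1).map (fun i => (increment_grid grid i, i))
  let comb := left_col.foldl
    (fun (comb : Option (List (List Int))) lb =>
      let row := (PySem.List.pyRange 1 5 1).foldl
        (fun row i => combine_horizontal row (increment_grid lb.1 (i + lb.2))) lb.1
      match comb with
      | none => some row
      | some c => some (combine_vertical c row)) none
  -- range(5) is nonempty, so comb is never None here; .getD [] only totalises the match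
  comb.getD []

-- ===== PORT B =====
def generate_full_grid_alt (grid : List (List Int)) : List (List Int) :=
  (PySem.List.pyRange 0 5 1).flatMap (fun tr =>
    grid.map (fun src =>
      (PySem.List.pyRange 0 (5 * (src.length : Int)) 1).map (fun c =>
        PySem.Int.mod
          (PySem.List.pyGetD src (PySem.Int.mod c (src.length : Int)) 0
            - 1 + tr + PySem.Int.floordiv c (src.length : Int)) 9 + 1)))

-- ===== PRECONDITION & SPEC =====
def Spec_generate_full_grid (grid : List (List Int)) (out : List (List Int)) : Prop := out = generate_full_grid_alt grid
instance (grid : List (List Int)) (out : List (List Int)) : Decidable (Spec_generate_full_grid grid out) := by unfold Spec_generate_full_grid; infer_instance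

-- ===== CLAIM (what is proved, stated in full; the proofs are below) =====
def Claim_equal_generate_full_grid : Prop := ∀ (grid : List (List Int)), Dom_generate_full_grid grid → Spec_generate_full_grid grid (generate_full_grid grid)

-- ===== LEMMAS AND PROOFS =====

-- combine_horizontal on two maps over the same list merges pointwise
theorem pv_zip_map_append {α : Type} (g : List α) (a b : α → List Int) :
    ((g.map a).zip (g.map b)).map (fun p => p.1 ++ p.2) = g.map (fun r => a r ++ b r) := by
  induction g with
  | nil => rfl
  | cons x xs ih => simp [ih]

-- one horizontal tile of B's inner comprehension equals one incremented copy of src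
theorem pv_block_eq (src : List Int) (i w : Int) :
    (PySem.List.pyRange (i * (src.length : Int)) ((i + 1) * (src.length : Int)) 1).map
      (fun c => PySem.Int.mod
          (PySem.List.pyGetD src (PySem.Int.mod c (src.length : Int)) 0
            - 1 + w + PySem.Int.floordiv c (src.length : Int)) 9 + 1)
      = src.map (fun v => PySem.Int.mod (v - 1 + (i + w)) 9 + 1) := by
  rw [PySem.List.pyRange_one]
  have hlen : (((i + 1) * (src.length : Int)) - i * (src.length : Int)).toNat = src.length := by
    have h : ((i + 1) * (src.length : Int)) - i * (src.length : Int) = (src.length : Int) := by ring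
    rw [h]; exact Int.toNat_natCast _
  rw [hlen]
  apply List.ext_getElem (by simp)
  intro k hk _
  simp only [List.getElem_map, List.getElem_range]
  have hkn : k < src.length := by simpa using hk
  have hn : (0 : Int) < (src.length : Int) := by omega
  have hmod : PySem.Int.mod (i * (src.length : Int) + (k : Int)) (src.length : Int) = (k : Int) := by
    rw [PySem.Int.mod_eq_emod_of_pos hn, add_comm, Int.add_mul_emod_self_right]
    exact Int.emod_eq_of_lt (by positivity) (by exact_mod_cast hkn)
  have hdiv : PySem.Int.floordiv (i * (src.length : Int) + (k : Int)) (src.length : Int) = i := by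
    rw [PySem.Int.floordiv_eq_ediv_of_pos hn, add_comm,
        Int.add_mul_ediv_right _ _ (by omega : (src.length : Int) ≠ 0),
        Int.ediv_eq_zero_of_lt (by positivity) (by exact_mod_cast hkn)]
    ring
  rw [hmod, hdiv]
  simp only [PySem.List.pyGetD_natCast, List.getD_eq_getElem?_getD, List.getElem?_eq_getElem hkn,
    Option.getD_some]
  congr 1
  ring_nf

-- B's inner row for tile row `tr` is the five incremented copies of src
theorem pv_inner_eq (src : List Int) (tr : Int) :
    (PySem.List.pyRange 0 (5 * (src.length : Int)) 1).map
      (fun c => PySem.Int.mod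
          (PySem.List.pyGetD src (PySem.Int.mod c (src.length : Int)) 0
            - 1 + tr + PySem.Int.floordiv c (src.length : Int)) 9 + 1)
      = (((src.map (fun v => PySem.Int.mod (v - 1 + tr) 9 + 1)
          ++ src.map (fun v => PySem.Int.mod (v - 1 + (1 + tr)) 9 + 1))
          ++ src.map (fun v => PySem.Int.mod (v - 1 + (2 + tr)) 9 + 1))
          ++ src.map (fun v => PySem.Int.mod (v - 1 + (3 + tr)) 9 + 1))
          ++ src.map (fun v => PySem.Int.mod (v - 1 + (4 + tr)) 9 + 1) := by
  have hn : (0 : Int) ≤ (src.length : Int) := by positivity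
  have h0 := pv_block_eq src 0 tr
  have h1 := pv_block_eq src 1 tr
  have h2 := pv_block_eq src 2 tr
  have h3 := pv_block_eq src 3 tr
  have h4 := pv_block_eq src 4 tr
  norm_num at h0 h1 h2 h3 h4
  rw [PySem.List.pyRange_one_append 0 (4 * (src.length : Int)) (5 * (src.length : Int)) (by omega) (by omega),
      PySem.List.pyRange_one_append 0 (3 * (src.length : Int)) (4 * (src.length : Int)) (by omega) (by omega),
      PySem.List.pyRange_one_append 0 (2 * (src.length : Int)) (3 * (src.length : Int)) (by omega) (by omega),
      PySem.List.pyRange_one_append 0 (1 * (src.length : Int)) (2 * (src.length : Int)) (by omega) (by omega)]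
  simp only [List.map_append]
  norm_num
  rw [h0, h1, h2, h3, h4]

-- ===== VERDICT (by name: the statement is the Claim_ definition above) =====
theorem generate_full_grid_spec : Claim_equal_generate_full_grid := by
  intro grid _
  unfold Spec_generate_full_grid generate_full_grid generate_full_grid_alt
  have h5 : PySem.List.pyRange 0 5 1 = [0, 1, 2, 3, 4] := by decide
  have h4 : PySem.List.pyRange 1 5 1 = [1, 2, 3, 4] := by decide
  simp only [h5, h4, List.map_cons, List.map_nil, List.foldl_cons, List.foldl_nil,
    List.flatMap_cons, List.flatMap_nil, pv_zip_map_append, pv_inner_eq, Option.getD_some]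
  simp [List.append_assoc]
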